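-- pv_equiv track=rewrite | github.com/jaymsDooku/IRMS | database.py | parse_queries
-- ===== SOURCE A (Python) =====
-- def parse_queries(script):
-- 	queries = []
-- 	current_query = ""
-- 	for line in script:
-- 		current_query += line
-- 		if ';' in line:
-- 			queries.append(current_query)
-- 			current_query = ""
-- 	return queries
-- ===== SOURCE B (Python) =====
-- def parse_queries(script):
--     lines = list(script)
--     bounds = [i for i, line in enumerate(lines) if ';' in line]
--     queries = []
--     start = 0
--     for b in bounds:
--         queries.append(''.join(lines[start:b + 1]))
--         start = b + 1
--     return queries
-- ===== Notes on version B (the rewrite author's own statement) =====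
-- stated objective: alternative
-- what changed: Replaces A's single accumulate-as-you-go loop by a two-pass index-table structure: first collect the indices of semicolon-bearing lines, then emit each query as the join of the line slice between consecutive boundaries, dropping trailing semicolon-free lines implicitly.
import Mathlib
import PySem

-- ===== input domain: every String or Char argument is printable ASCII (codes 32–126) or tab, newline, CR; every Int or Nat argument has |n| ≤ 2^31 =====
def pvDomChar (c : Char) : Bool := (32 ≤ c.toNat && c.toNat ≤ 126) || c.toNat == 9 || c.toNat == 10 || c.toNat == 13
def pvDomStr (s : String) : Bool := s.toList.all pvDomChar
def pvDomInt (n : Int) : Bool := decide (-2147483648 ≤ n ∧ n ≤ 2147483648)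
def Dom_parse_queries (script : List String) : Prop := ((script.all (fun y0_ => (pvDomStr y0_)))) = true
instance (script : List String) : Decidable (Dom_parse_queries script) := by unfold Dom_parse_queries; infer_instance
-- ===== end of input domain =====

-- B replaces A's accumulate-as-you-go loop by a boundary-index table plus slice-and-join
-- passes (same O(total length) cost; objective: alternative decomposition).

-- ===== PORT A =====
def parse_queries (script : List String) : List String :=
  (script.foldl
    (fun (st : List String × String) line =>
      let current := st.2 ++ line
      if PySem.Str.isIn ";" line then (st.1 ++ [current], "") else (st.1, current))
    ([], "")).1

-- ===== PORT B =====
def parse_queries_alt (script : List String) : List String :=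
  let lines := script
  let bounds := ((PySem.List.enumerate lines).filter
      (fun p => PySem.Str.isIn ";" p.2)).map (fun p => p.1)
  (bounds.foldl
    (fun (st : List String × Int) b =>
      (st.1 ++ [PySem.Str.join "" (PySem.List.slice lines (some st.2) (some (b + 1)))], b + 1))
    ([], (0 : Int))).1

-- ===== PRECONDITION & SPEC =====
def Spec_parse_queries (script : List String) (out : List String) : Prop := out = parse_queries_alt script
instance (script : List String) (out : List String) : Decidable (Spec_parse_queries script out) := by unfold Spec_parse_queries; infer_instance

-- ===== CLAIM (what is proved, stated in full; the proofs are below) =====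
def Claim_equal_parse_queries : Prop := ∀ (script : List String), Dom_parse_queries script → Spec_parse_queries script (parse_queries script)

-- ===== LEMMAS AND PROOFS =====

-- the common semicolon-chunking function both ports compute
def pvChunks (cur : String) : List String → List String
  | [] => []
  | l :: r => if PySem.Str.isIn ";" l then (cur ++ l) :: pvChunks "" r else pvChunks (cur ++ l) r

theorem pvJoin_nil : PySem.Str.join "" [] = "" := by
  rw [← String.toList_inj, PySem.Str.toList_join]
  simp [PySem.Chars.join_nil]

theorem pvJoin_flatten (xs : List (List Char)) : PySem.Chars.join [] xs = xs.flatten := by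
  induction xs with
  | nil => simp [PySem.Chars.join_nil]
  | cons c cs ih =>
    cases cs with
    | nil => simp [PySem.Chars.join_singleton]
    | cons d ds => rw [PySem.Chars.join_cons_cons]; simp_all

theorem pvJoin_snoc (xs : List String) (y : String) :
    PySem.Str.join "" (xs ++ [y]) = PySem.Str.join "" xs ++ y := by
  rw [← String.toList_inj, String.toList_append, PySem.Str.toList_join, PySem.Str.toList_join]
  simp [pvJoin_flatten]

theorem pvFoldA (ls qs : List String) (cur : String) :
    (ls.foldl
      (fun (st : List String × String) line =>
        let current := st.2 ++ line
        if PySem.Str.isIn ";" line then (st.1 ++ [current], "") else (st.1, current))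
      (qs, cur)).1 = qs ++ pvChunks cur ls := by
  induction ls generalizing qs cur with
  | nil => simp [pvChunks]
  | cons l r ih =>
    by_cases h : PySem.Str.isIn ";" l
    · simp only [List.foldl_cons, h, if_true, ih, pvChunks, List.append_assoc,
        List.singleton_append]
    · simp only [List.foldl_cons, h, if_false, Bool.false_eq_true, ih, pvChunks]

theorem pvFoldB (ds : List String) : ∀ (pre qs : List String) (s : Nat), s ≤ pre.length →
    ((((PySem.List.enumerate ds ((pre.length : Nat) : Int)).filter
        (fun p => PySem.Str.isIn ";" p.2)).map (fun p => p.1)).foldl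
      (fun (st : List String × Int) b =>
        (st.1 ++ [PySem.Str.join "" (PySem.List.slice (pre ++ ds) (some st.2) (some (b + 1)))],
          b + 1))
      (qs, (s : Int))).1
    = qs ++ pvChunks (PySem.Str.join "" (pre.drop s)) ds := by
  induction ds with
  | nil => intro pre qs s hs; simp [PySem.List.enumerate, pvChunks]
  | cons l r ih =>
    intro pre qs s hs
    rw [PySem.List.enumerate_cons]
    have hlen : ((pre.length : Nat) : Int) + 1 = (((pre ++ [l]).length : Nat) : Int) := by
      simp
    have hlines : pre ++ l :: r = (pre ++ [l]) ++ r := by simp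
    have hdrop : (pre ++ [l]).drop s = pre.drop s ++ [l] := by
      rw [List.drop_append_of_le_length hs]
    by_cases h : PySem.Str.isIn ";" l
    · -- boundary line: one query is emitted here
      have hslice : PySem.List.slice (pre ++ l :: r) (some ((s : Nat) : Int))
          (some (((pre.length : Nat) : Int) + 1))
          = pre.drop s ++ [l] := by
        have h1 : ((pre.length : Nat) : Int) + 1 = (((pre.length + 1 : Nat)) : Int) := by
          push_cast; ring
        rw [h1, PySem.List.slice_natCast]
        rw [List.drop_append_of_le_length hs]
        have h2 : pre.length + 1 - s = (pre.drop s).length + 1 := by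
          simp [List.length_drop]; omega
        rw [h2]
        simp [List.take_append]
      simp only [List.filter_cons, h, if_true, List.map_cons, List.foldl_cons, hslice]
      rw [hlen, hlines]
      have := ih (pre ++ [l]) (qs ++ [PySem.Str.join "" (pre.drop s) ++ l]) (pre ++ [l]).length
        (le_refl _)
      simp only [List.drop_length, pvJoin_snoc] at this ⊢
      rw [this, pvJoin_nil]
      simp only [pvChunks, h, if_true, List.append_assoc, List.singleton_append]
    · -- no semicolon: the line stays pending
      simp only [List.filter_cons, h, Bool.false_eq_true, if_false]
      rw [hlen, hlines]
      have hs' : s ≤ (pre ++ [l]).length := by simp; omega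
      rw [ih (pre ++ [l]) qs s hs']
      rw [hdrop, pvJoin_snoc]
      simp only [pvChunks]
      rw [if_neg h]

-- ===== VERDICT (by name: the statement is the Claim_ definition above) =====
theorem parse_queries_spec : Claim_equal_parse_queries := by
  intro script _
  unfold Spec_parse_queries parse_queries parse_queries_alt
  rw [pvFoldA]
  have := pvFoldB script [] [] 0 (by simp)
  simp only [List.nil_append, List.length_nil, Nat.cast_zero, List.drop_nil, pvJoin_nil] at this
  rw [this]
  simp
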